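-- pv_equiv track=rewrite | github.com/feiyu7348/python- | 笔试在线编辑/度小满第二题.py | func
-- ===== SOURCE A (Python) =====
-- def func(s, n):
--     res = []
--     for c in s:
--         if c == 'O':
--             res.append('1')
--         elif c == 'X':
--             res.append('0')
--     res = ''.join(res)
--
--     ans = []
--     for nums in n:
--         conut = 0
--         for i in range(len(res)):
--             if res[i] == '0' and nums[i] == '1':
--                 ans.append('NO')
--                 break
--             conut += 1
--
--         if conut == len(res):
--             ans.append('YES')
--
--     return ans
-- ===== SOURCE B (Python) =====
-- def func(s, n):
--     # one pass over s: record the ascending list of forbidden mask positions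
--     forbidden = []
--     mask_len = 0
--     for c in s:
--         if c == 'O':
--             mask_len += 1
--         elif c == 'X':
--             forbidden.append(mask_len)
--             mask_len += 1
--     ans = []
--     for nums in n:
--         verdict = 'YES'
--         for pos in forbidden:
--             if nums[pos] == '1':
--                 verdict = 'NO'
--                 break
--         ans.append(verdict)
--     return ans
-- ===== Notes on version B (the rewrite author's own statement) =====
-- stated objective: alternative
-- what changed: B precomputes the ascending list of forbidden positions in one pass over s and answers each query by scanning only that index list (first hit wins), instead of A's building a mask string and scanning every mask position per query with a counter.
import Mathlib
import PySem

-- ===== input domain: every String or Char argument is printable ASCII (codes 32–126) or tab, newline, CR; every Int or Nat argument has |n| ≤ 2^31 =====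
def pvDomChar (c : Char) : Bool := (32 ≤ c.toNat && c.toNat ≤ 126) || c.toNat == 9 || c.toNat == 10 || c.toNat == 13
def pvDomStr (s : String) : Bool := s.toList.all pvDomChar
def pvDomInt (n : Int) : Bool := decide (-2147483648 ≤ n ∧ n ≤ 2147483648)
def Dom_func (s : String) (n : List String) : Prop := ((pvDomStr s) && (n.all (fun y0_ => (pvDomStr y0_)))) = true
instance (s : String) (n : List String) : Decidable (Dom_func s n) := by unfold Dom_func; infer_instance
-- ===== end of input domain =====

-- B precomputes the ascending list of forbidden positions in one pass over s and answers
-- each query by scanning only that index list, instead of A's per-query scan of every mask position.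
-- (One-line objective: alternative algorithm/data structure, same cost class.)

-- ===== PORT A =====
-- inner loop of A: 'for i in range(len(res)): …' with counter conut; res kept as its char list
-- (''.join is represented by the list of mask characters).  nums[i] is PySem.Str.pyGet?;
-- outside Pre_func Python raises IndexError there, the port continues with a default.
def funcInner (res : List Char) (nums : String) (i conut : Nat) : List String :=
  if i < res.length then
    if res.getD i ' ' = '0' ∧ (PySem.Str.pyGet? nums (i : Int)).getD '?' = '1' then
      ["NO"]
    else
      funcInner res nums (i + 1) (conut + 1)
  else if conut = res.length then ["YES"] else []
termination_by res.length - i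

def func (s : String) (n : List String) : List String :=
  let res : List Char := s.toList.foldl (fun acc c =>
    if c = 'O' then acc ++ ['1'] else if c = 'X' then acc ++ ['0'] else acc) []
  n.foldl (fun ans nums => ans ++ funcInner res nums 0 0) []

-- ===== PORT B =====
-- 'for pos in forbidden: if nums[pos] == "1": verdict = "NO"; break'
def funcAltCheck (forbidden : List Nat) (nums : String) : String :=
  match forbidden with
  | [] => "YES"
  | pos :: rest =>
    if (PySem.Str.pyGet? nums (pos : Int)).getD '?' = '1' then "NO"
    else funcAltCheck rest nums

def func_alt (s : String) (n : List String) : List String :=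
  let fb : List Nat × Nat := s.toList.foldl (fun p c =>
    if c = 'O' then (p.1, p.2 + 1)
    else if c = 'X' then (p.1 ++ [p.2], p.2 + 1)
    else p) ([], 0)
  n.map (fun nums => funcAltCheck fb.1 nums)

-- ===== PRECONDITION & SPEC =====
-- the mask A builds from s, restated independently of the ports (for Pre_ only)
def pvMask (s : String) : List Char :=
  s.toList.filterMap (fun c => if c = 'O' then some '1' else if c = 'X' then some '0' else none)

-- Pre_func holds exactly when Python A returns: for every query, every forbidden mask
-- position j the scan reaches lies inside the query (otherwise nums[j] raises IndexError;
-- an earlier forbidden position holding '1' stops the scan first and avoids the raise).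
def Pre_func (s : String) (n : List String) : Prop :=
  ∀ nums ∈ n, ∀ j ∈ List.range (pvMask s).length,
    (pvMask s).getD j ' ' = '0' →
    (j < nums.toList.length ∨
      ∃ j' ∈ List.range j, (pvMask s).getD j' ' ' = '0' ∧ nums.toList.getD j' ' ' = '1')
instance (s : String) (n : List String) : Decidable (Pre_func s n) := by
  unfold Pre_func; infer_instance

def pvWitness_func : String × List String := ("OXO", ["101", "000"])

def Spec_func (s : String) (n : List String) (out : List String) : Prop := out = func_alt s n
instance (s : String) (n : List String) (out : List String) : Decidable (Spec_func s n out) := by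
  unfold Spec_func; infer_instance

-- ===== CLAIM (what is proved, stated in full; the proofs are below) =====
def Claim_equal_func : Prop :=
  ∀ (s : String) (n : List String), Dom_func s n → Pre_func s n → Spec_func s n (func s n)

-- ===== LEMMAS AND PROOFS =====

-- proof-side mask and forbidden-position list
def maskOf (l : List Char) : List Char :=
  l.filterMap (fun c => if c = 'O' then some '1' else if c = 'X' then some '0' else none)

def forbOf : List Char → Nat → List Nat
  | [], _ => []
  | c :: t, k => if c = 'O' then forbOf t (k + 1)
                 else if c = 'X' then k :: forbOf t (k + 1)
                 else forbOf t k

-- indices of '0' entries of a mask, offset by k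
def forbMask : List Char → Nat → List Nat
  | [], _ => []
  | c :: t, k => if c = '0' then k :: forbMask t (k + 1) else forbMask t (k + 1)

theorem foldA_eq_maskOf (l : List Char) (acc : List Char) :
    l.foldl (fun acc c =>
      if c = 'O' then acc ++ ['1'] else if c = 'X' then acc ++ ['0'] else acc) acc
    = acc ++ maskOf l := by
  induction l generalizing acc with
  | nil => simp [maskOf]
  | cons c t ih =>
    by_cases h1 : c = 'O' <;> by_cases h2 : c = 'X' <;>
      simp [List.foldl_cons, maskOf, h1, h2, ih]

theorem foldB_eq_forbOf (l : List Char) (fb : List Nat) (k : Nat) :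
    l.foldl (fun p c =>
      if c = 'O' then (p.1, p.2 + 1)
      else if c = 'X' then (p.1 ++ [p.2], p.2 + 1)
      else p) (fb, k)
    = (fb ++ forbOf l k, k + (maskOf l).length) := by
  induction l generalizing fb k with
  | nil => simp [forbOf, maskOf]
  | cons c t ih =>
    by_cases h1 : c = 'O' <;> by_cases h2 : c = 'X' <;>
      simp [List.foldl_cons, forbOf, maskOf, h1, h2, ih] <;> omega

theorem forbOf_eq_forbMask (l : List Char) (k : Nat) :
    forbOf l k = forbMask (maskOf l) k := by
  induction l generalizing k with
  | nil => simp [forbOf, forbMask, maskOf]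
  | cons c t ih =>
    by_cases h1 : c = 'O' <;> by_cases h2 : c = 'X' <;>
      simp [forbOf, forbMask, maskOf, h1, h2, ih]

-- the mask drop step: forbMask of a dropped suffix
theorem funcInner_eq_check (m : List Char) (nums : String) (i : Nat) (h : i ≤ m.length) :
    funcInner m nums i i = [funcAltCheck (forbMask (m.drop i) i) nums] := by
  by_cases hi : i < m.length
  · have hdrop : m.drop i = m[i] :: m.drop (i + 1) := List.drop_eq_getElem_cons hi
    have hgetD : m.getD i ' ' = m[i] := by
      simp [List.getD, List.getElem?_eq_getElem hi]
    rw [funcInner, if_pos hi, hdrop]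
    by_cases h0 : m[i] = '0'
    · by_cases h1 : (PySem.Str.pyGet? nums (i : Int)).getD '?' = '1'
      · rw [if_pos ⟨by rw [hgetD]; exact h0, h1⟩]
        simp at h1
        simp [forbMask, h0, funcAltCheck, h1]
      · rw [if_neg (by rw [hgetD]; exact fun hc => h1 hc.2)]
        rw [funcInner_eq_check m nums (i + 1) hi]
        simp at h1
        simp [forbMask, h0, funcAltCheck, h1]
    · rw [if_neg (by rw [hgetD]; exact fun hc => h0 hc.1)]
      rw [funcInner_eq_check m nums (i + 1) hi]
      simp [forbMask, h0]
  · have hie : i = m.length := le_antisymm h (not_lt.mp hi)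
    rw [funcInner, if_neg hi, if_pos hie]
    simp [hie, forbMask, funcAltCheck]
termination_by m.length - i

theorem foldl_append_singleton {α β : Type} (f : α → β) (l : List α) (acc : List β) :
    l.foldl (fun a x => a ++ [f x]) acc = acc ++ l.map f := by
  induction l generalizing acc with
  | nil => simp
  | cons x t ih => simp [List.foldl_cons, ih]

-- ===== VERDICT (by name: the statement is the Claim_ definition above) =====
theorem func_spec : Claim_equal_func := by
  intro s n _ _
  unfold Spec_func func func_alt
  rw [foldA_eq_maskOf, foldB_eq_forbOf]
  simp only [List.nil_append, forbOf_eq_forbMask]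
  have h : ∀ nums : String,
      funcInner (maskOf s.toList) nums 0 0
        = [funcAltCheck (forbMask (maskOf s.toList) 0) nums] := fun nums => by
    simpa using funcInner_eq_check (maskOf s.toList) nums 0 (Nat.zero_le _)
  simp only [h]
  exact (foldl_append_singleton _ n []).trans (by simp)
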